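-- pv_equiv track=rewrite | github.com/lokesh-venkatesh/mitogenome_evolution | mitofuncs/mito.py | find_translocated_chunks
-- ===== SOURCE A (Python) =====
-- from collections import Counter
--
-- def find_translocated_chunks(genome1, genome2):
--     """
--     Given two ordered lists of gene names, where genome2 is assumed to be equal to or longer than genome1,
--     this function identifies the gene-chunks (as nested lists) that were translocated/inserted in genome2.
--
--     Algorithm:
--       1. Compare gene counts between genome1 and genome2. If a gene appears more times in genome2 than in genome1
--          (or is entirely new), mark that occurrence as "translocated".
--       2. Using two index variables (i for genome1, j for genome2), iterate over the lists to find the longest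
--          contiguous segments in genome2 that are in the same order as in genome1 (ignoring genes already flagged).
--          Any gene that is not part of one of these segments is marked as translocated.
--
--     The output is a nested list of gene-chunks from genome2 that were identified as translocated/inserted.
--     For example, if genome2 = ["A", "X", "B", "C", "Y", "D", "E"] (with genome1 = ["A", "B", "C", "D", "E"]),
--     the returned output will be: [["X"], ["Y"]]
--     """
--
--     # ----- Step 1: Flag extra or repeated genes in genome2 -----
--     counter1 = Counter(genome1)
--     translocated_flags = [False] * len(genome2)  # one flag per gene in genome2
--     occ_tracker = {}  # to track occurrences as we scan genome2
--
--     for idx, gene in enumerate(genome2):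
--         occ_tracker[gene] = occ_tracker.get(gene, 0) + 1
--         expected = counter1.get(gene, 0)
--         # if this gene occurs more times than expected, flag it as translocated (i.e. an insertion/repeat)
--         if occ_tracker[gene] > expected:
--             translocated_flags[idx] = True
--
--     # ----- Step 2: Find matching (in-order) segments in genome2 that correspond to genome1 -----
--     # We use two indices, i for genome1 and j for genome2.
--     i, j = 0, 0
--     n1, n2 = len(genome1), len(genome2)
--
--     # We also record the matching segments (as intervals of indices in genome2)
--     matching_segments = []
--
--     while i < n1 and j < n2:
--         # Skip over any gene in genome2 already flagged as extra/translocated.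
--         if translocated_flags[j]:
--             j += 1
--             continue
--
--         # When the current gene in genome2 matches the current gene in genome1,
--         # start recording a matching segment.
--         if genome1[i] == genome2[j]:
--             seg_start = j
--             # Extend the matching segment as far as possible.
--             while i < n1 and j < n2 and not translocated_flags[j] and genome1[i] == genome2[j]:
--                 i += 1
--                 j += 1
--             matching_segments.append((seg_start, j))
--         else:
--             # If the gene in genome2 does not match genome1[i], mark it as out-of-order.
--             translocated_flags[j] = True
--             j += 1
--
--     # Any remaining genes in genome2 (after the two-pointer loop) are not part of any matching segment.
--     while j < n2:
--         translocated_flags[j] = True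
--         j += 1
--
--     # ----- Build the nested list of translocated/inserted gene-chunks -----
--     # We simply group together consecutive genes in genome2 that were flagged.
--     translocated_chunks = []
--     current_chunk = []
--
--     for idx, flag in enumerate(translocated_flags):
--         if flag:
--             current_chunk.append(genome2[idx])
--         else:
--             if current_chunk:
--                 translocated_chunks.append(current_chunk)
--                 current_chunk = []
--     # If the last genes in genome2 were flagged, add the final chunk.
--     if current_chunk:
--         translocated_chunks.append(current_chunk)
--
--     return translocated_chunks
-- ===== SOURCE B (Python) =====
-- from collections import Counter
--
-- def find_translocated_chunks(genome1, genome2):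
--     """Single left-to-right sweep over genome2: decide each gene's flag inline
--     (excess-occurrence check + two-pointer match against genome1) and grow/flush
--     the current chunk directly, instead of materializing a flags array in three passes."""
--     counter1 = Counter(genome1)
--     seen = Counter()
--     i, n1 = 0, len(genome1)
--     chunks = []
--     cur = []
--     for gene in genome2:
--         seen[gene] += 1
--         if seen[gene] > counter1[gene]:
--             flagged = True
--         elif i < n1 and genome1[i] == gene:
--             i += 1
--             flagged = False
--         else:
--             flagged = True
--         if flagged:
--             cur.append(gene)
--         else:
--             if cur:
--                 chunks.append(cur)
--                 cur = []
--     if cur: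
--         chunks.append(cur)
--     return chunks
-- ===== Notes on version B (the rewrite author's own statement) =====
-- stated objective: simpler
-- what changed: Fuses A's three passes (excess-count flag array, two-pointer rewrite of the flags, regrouping pass) into one left-to-right sweep over genome2 that decides each gene's flag inline and grows/flushes the current chunk directly, with no flags array or segment list.
import Mathlib
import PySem

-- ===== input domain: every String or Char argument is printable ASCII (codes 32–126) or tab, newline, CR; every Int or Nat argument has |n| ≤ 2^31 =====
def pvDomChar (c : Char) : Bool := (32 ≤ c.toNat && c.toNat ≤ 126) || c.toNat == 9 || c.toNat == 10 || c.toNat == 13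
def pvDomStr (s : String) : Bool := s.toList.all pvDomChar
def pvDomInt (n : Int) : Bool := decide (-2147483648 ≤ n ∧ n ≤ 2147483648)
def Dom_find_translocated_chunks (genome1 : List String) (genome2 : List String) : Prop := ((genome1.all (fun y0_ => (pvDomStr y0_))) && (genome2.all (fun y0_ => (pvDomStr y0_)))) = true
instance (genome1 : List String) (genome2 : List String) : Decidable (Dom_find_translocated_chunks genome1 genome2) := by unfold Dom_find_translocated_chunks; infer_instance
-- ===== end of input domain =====

-- B fuses A's three passes (flag array, two-pointer rewrite, regrouping) into one sweep
-- over genome2 that decides each flag inline and builds the chunks directly (objective: simpler).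


-- ===== PORT A =====
-- inner 'while' of step 2: extend the matching segment as far as possible
-- (fuel is only a totality guard; g2.length is always enough, since j grows each step)
def fta_extend (g1 g2 : List String) (flags : List Bool) : Nat → Nat → Nat → Nat × Nat
  | 0, i, j => (i, j)
  | fuel + 1, i, j =>
    if i < g1.length ∧ j < g2.length ∧ flags.getD j false = false ∧ g1.getD i "" = g2.getD j "" then
      fta_extend g1 g2 flags fuel (i + 1) (j + 1)
    else (i, j)

-- outer 'while i < n1 and j < n2' of step 2; returns the final (i, j, flags, segments)
-- (fuel is only a totality guard; g2.length + 1 is always enough, since j grows each iteration)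
def fta_loop (g1 g2 : List String) : Nat → Nat → Nat → List Bool → List (Nat × Nat) →
    Nat × Nat × List Bool × List (Nat × Nat)
  | 0, i, j, flags, segs => (i, j, flags, segs)
  | fuel + 1, i, j, flags, segs =>
    if i < g1.length ∧ j < g2.length then
      if flags.getD j false then fta_loop g1 g2 fuel i (j + 1) flags segs
      else if g1.getD i "" = g2.getD j "" then
        let p := fta_extend g1 g2 flags g2.length i j
        fta_loop g1 g2 fuel p.1 p.2 flags (segs ++ [(j, p.2)])
      else fta_loop g1 g2 fuel i (j + 1) (flags.set j true) segs
    else (i, j, flags, segs)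

-- trailing 'while j < n2: flags[j] = True' (fuel: flags.length is always enough)
def fta_tail : Nat → List Bool → Nat → List Bool
  | 0, flags, _ => flags
  | fuel + 1, flags, j => if j < flags.length then fta_tail fuel (flags.set j true) (j + 1) else flags

def find_translocated_chunks (genome1 : List String) (genome2 : List String) : List (List String) :=
  let counter1 := PySem.Dict.counter genome1
  -- step 1: flag extra/repeated genes
  let st1 := (PySem.List.enumerate genome2).foldl
    (fun (st : PySem.Dict String Int × List Bool) p =>
      let occ := st.1.insert p.2 (st.1.getD p.2 0 + 1)
      if occ.getD p.2 0 > counter1.getD p.2 0 then (occ, st.2.set p.1.toNat true) else (occ, st.2))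
    (PySem.Dict.empty, List.replicate genome2.length false)
  -- step 2: two-pointer scan, then flag the remaining tail
  let r := fta_loop genome1 genome2 (genome2.length + 1) 0 0 st1.2 []
  let flags := fta_tail r.2.2.1.length r.2.2.1 r.2.1
  -- step 3: group consecutive flagged genes into chunks
  let st3 := (PySem.List.enumerate flags).foldl
    (fun (st : List (List String) × List String) p =>
      if p.2 then (st.1, st.2 ++ [PySem.List.pyGetD genome2 p.1 ""])
      else if st.2.isEmpty then st else (st.1 ++ [st.2], []))
    ([], [])
  if st3.2.isEmpty then st3.1 else st3.1 ++ [st3.2]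

-- ===== PORT B =====
def find_translocated_chunks_alt (genome1 : List String) (genome2 : List String) : List (List String) :=
  let counter1 := PySem.Dict.counter genome1
  let st := genome2.foldl
    (fun (st : PySem.Dict String Int × Nat × List (List String) × List String) gene =>
      let seen := st.1.insert gene (st.1.getD gene 0 + 1)
      if seen.getD gene 0 > counter1.getD gene 0 then
        (seen, st.2.1, st.2.2.1, st.2.2.2 ++ [gene])
      else if st.2.1 < genome1.length ∧ genome1.getD st.2.1 "" = gene then
        (seen, st.2.1 + 1, (if st.2.2.2.isEmpty then st.2.2.1 else st.2.2.1 ++ [st.2.2.2]), [])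
      else (seen, st.2.1, st.2.2.1, st.2.2.2 ++ [gene]))
    (PySem.Dict.empty, 0, [], [])
  if st.2.2.2.isEmpty then st.2.2.1 else st.2.2.1 ++ [st.2.2.2]

-- ===== PRECONDITION & SPEC =====
def Spec_find_translocated_chunks (genome1 : List String) (genome2 : List String) (out : List (List String)) : Prop := out = find_translocated_chunks_alt genome1 genome2
instance (genome1 : List String) (genome2 : List String) (out : List (List String)) : Decidable (Spec_find_translocated_chunks genome1 genome2 out) := by unfold Spec_find_translocated_chunks; infer_instance

-- ===== CLAIM (what is proved, stated in full; the proofs are below) =====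
def Claim_equal_find_translocated_chunks : Prop := ∀ (genome1 : List String) (genome2 : List String), Dom_find_translocated_chunks genome1 genome2 → Spec_find_translocated_chunks genome1 genome2 (find_translocated_chunks genome1 genome2)

-- ===== LEMMAS AND PROOFS =====

-- flags produced by A's step 1 for the suffix `suf` of genome2, given the processed prefix `pre`
def pvFlags1 (g1 : List String) : List String → List String → List Bool
  | _, [] => []
  | pre, g :: rest => decide (g1.count g ≤ pre.count g) :: pvFlags1 g1 (pre ++ [g]) rest

-- the combined (step 1 + step 2) flag sequence, computed in one pass
def pvCFlags (g1 : List String) : Nat → List String → List String → List Bool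
  | _, _, [] => []
  | i, pre, g :: rest =>
    if g1.count g ≤ pre.count g then true :: pvCFlags g1 i (pre ++ [g]) rest
    else if i < g1.length ∧ g1.getD i "" = g then false :: pvCFlags g1 (i + 1) (pre ++ [g]) rest
    else true :: pvCFlags g1 i (pre ++ [g]) rest

-- one step of grouping a (flag, gene) pair into (chunks, current chunk)
def pvGStep (st : List (List String) × List String) (p : Bool × String) :
    List (List String) × List String :=
  if p.1 then (st.1, st.2 ++ [p.2]) else if st.2.isEmpty then st else (st.1 ++ [st.2], [])

theorem pvFlags1_length (g1 : List String) :
    ∀ (suf pre : List String), (pvFlags1 g1 pre suf).length = suf.length := by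
  intro suf
  induction suf with
  | nil => intro pre; rfl
  | cons g rest ih => intro pre; simp [pvFlags1, ih]

theorem pvCFlags_length (g1 : List String) :
    ∀ (suf : List String) (i : Nat) (pre : List String),
      (pvCFlags g1 i pre suf).length = suf.length := by
  intro suf
  induction suf with
  | nil => intro i pre; rfl
  | cons g rest ih =>
    intro i pre
    simp only [pvCFlags]
    split_ifs <;> simp [ih]

theorem pvCFlags_of_le (g1 : List String) :
    ∀ (suf : List String) (i : Nat) (pre : List String), g1.length ≤ i →
      pvCFlags g1 i pre suf = List.replicate suf.length true := by
  intro suf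
  induction suf with
  | nil => intro i pre _; rfl
  | cons g rest ih =>
    intro i pre hi
    simp only [pvCFlags]
    split_ifs with h1 h2
    · simp [ih _ _ hi, List.replicate_succ]
    · omega
    · simp [ih _ _ hi, List.replicate_succ]

-- updating the occurrence dict keeps the "counts of the processed prefix" invariant
theorem pvSeen_step (pre : List String) (g : String) (seen : PySem.Dict String Int)
    (hseen : ∀ x, seen.getD x 0 = (pre.count x : Int)) :
    ∀ x, (seen.insert g (seen.getD g 0 + 1)).getD x 0 = (((pre ++ [g]).count x : Nat) : Int) := by
  intro x
  rw [PySem.Dict.getD_insert]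
  by_cases hx : x = g
  · subst hx; simp [hseen, List.count_append]
  · simp [hx, hseen, List.count_append, Ne.symm hx]

-- ----- step 1 of A produces pvFlags1 -----
theorem pvStep1 (g1 : List String) :
    ∀ (suf pre : List String) (done : List Bool) (occ : PySem.Dict String Int),
      (∀ x, occ.getD x 0 = (pre.count x : Int)) → done.length = pre.length →
      ((PySem.List.enumerate suf (pre.length : Int)).foldl
        (fun (st : PySem.Dict String Int × List Bool) p =>
          let occ := st.1.insert p.2 (st.1.getD p.2 0 + 1)
          if occ.getD p.2 0 > (PySem.Dict.counter g1).getD p.2 0 then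
            (occ, st.2.set p.1.toNat true) else (occ, st.2))
        (occ, done ++ List.replicate suf.length false)).2
      = done ++ pvFlags1 g1 pre suf := by
  intro suf
  induction suf with
  | nil => intro pre done occ _ _; simp [pvFlags1]
  | cons g rest ih =>
    intro pre done occ hocc hlen
    rw [PySem.List.enumerate_cons, List.foldl_cons]
    have hcnt : (occ.insert g (occ.getD g 0 + 1)).getD g 0 = ((pre.count g : Nat) : Int) + 1 := by
      rw [PySem.Dict.getD_insert_self, hocc]
    have hctr : (PySem.Dict.counter g1).getD g 0 = ((g1.count g : Nat) : Int) :=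
      PySem.Dict.getD_counter g1 g
    have hnext : ∀ x, (occ.insert g (occ.getD g 0 + 1)).getD x 0 = (((pre ++ [g]).count x : Nat) : Int) :=
      pvSeen_step pre g occ hocc
    simp only [pvFlags1]
    by_cases he : g1.count g ≤ pre.count g
    · rw [if_pos (by rw [hcnt, hctr]; omega)]
      have hset : (done ++ List.replicate (g :: rest).length false).set ((pre.length : Int)).toNat true
          = (done ++ [true]) ++ List.replicate rest.length false := by
        rw [Int.toNat_natCast, ← hlen]
        simp [List.replicate_succ]
      rw [hset]
      have harg : ((pre.length : Int)) + 1 = (((pre ++ [g]).length : Nat) : Int) := by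
        simp
      rw [harg, ih (pre ++ [g]) (done ++ [true]) _ hnext (by simp [hlen])]
      simp [he]
    · rw [if_neg (by rw [hcnt, hctr]; omega)]
      have hsplit : done ++ List.replicate (g :: rest).length false
          = (done ++ [false]) ++ List.replicate rest.length false := by
        simp [List.replicate_succ]
      rw [hsplit]
      have harg : ((pre.length : Int)) + 1 = (((pre ++ [g]).length : Nat) : Int) := by
        simp
      rw [harg, ih (pre ++ [g]) (done ++ [false]) _ hnext (by simp [hlen])]
      simp [he]

-- ----- basic facts about the inner extend loop -----
theorem pvExtend_le (g1 g2 : List String) (flags : List Bool) :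
    ∀ (fe i j : Nat), j ≤ (fta_extend g1 g2 flags fe i j).2 := by
  intro fe
  induction fe with
  | zero => intro i j; exact le_rfl
  | succ fe ih =>
    intro i j
    rw [fta_extend]
    split_ifs
    · exact le_trans (by omega) (ih (i + 1) (j + 1))
    · exact le_rfl

theorem pvExtend_stop (g1 g2 : List String) (flags : List Bool) (fe i j : Nat)
    (hc : ¬ (i < g1.length ∧ j < g2.length ∧ flags.getD j false = false ∧ g1.getD i "" = g2.getD j "")) :
    fta_extend g1 g2 flags fe i j = (i, j) := by
  cases fe with
  | zero => rfl
  | succ fe => rw [fta_extend, if_neg hc]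

theorem pvExtend_lt (g1 g2 : List String) (flags : List Bool) (fe i j : Nat)
    (hc : i < g1.length ∧ j < g2.length ∧ flags.getD j false = false ∧ g1.getD i "" = g2.getD j "")
    (hfe : 0 < fe) : j < (fta_extend g1 g2 flags fe i j).2 := by
  cases fe with
  | zero => omega
  | succ fe =>
    rw [fta_extend, if_pos hc]
    exact lt_of_lt_of_le (by omega) (pvExtend_le g1 g2 flags fe (i + 1) (j + 1))

theorem pvExtend_fuel (g1 g2 : List String) (flags : List Bool) :
    ∀ (fe fe' i j : Nat), g2.length - j ≤ fe → g2.length - j ≤ fe' →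
      fta_extend g1 g2 flags fe i j = fta_extend g1 g2 flags fe' i j := by
  intro fe
  induction fe with
  | zero =>
    intro fe' i j h h'
    have hc : ¬ (i < g1.length ∧ j < g2.length ∧ flags.getD j false = false ∧
        g1.getD i "" = g2.getD j "") := by rintro ⟨-, h2, -, -⟩; omega
    rw [pvExtend_stop g1 g2 flags 0 i j hc, pvExtend_stop g1 g2 flags fe' i j hc]
  | succ fe ih =>
    intro fe' i j h h'
    by_cases hc : i < g1.length ∧ j < g2.length ∧ flags.getD j false = false ∧
        g1.getD i "" = g2.getD j ""
    · cases fe' with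
      | zero => exact absurd hc.2.1 (by omega)
      | succ fe' =>
        rw [fta_extend, fta_extend, if_pos hc, if_pos hc]
        exact ih fe' (i + 1) (j + 1) (by omega) (by omega)
    · rw [pvExtend_stop g1 g2 flags _ i j hc, pvExtend_stop g1 g2 flags fe' i j hc]

-- ----- the trailing while loop sets every remaining flag -----
theorem pvTail :
    ∀ (X : List Bool) (f : Nat) (preF : List Bool), X.length ≤ f →
      fta_tail f (preF ++ X) preF.length = preF ++ List.replicate X.length true := by
  intro X
  induction X with
  | nil =>
    intro f preF _
    cases f with
    | zero => simp [fta_tail]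
    | succ f => rw [fta_tail, if_neg (by simp)]; simp
  | cons b r ih =>
    intro f preF hf
    cases f with
    | zero => simp at hf
    | succ f =>
      rw [fta_tail, if_pos (by simp)]
      have hset : (preF ++ b :: r).set preF.length true = (preF ++ [true]) ++ r := by simp
      have hlen : preF.length + 1 = (preF ++ [true]).length := by simp
      rw [hset, hlen, ih f (preF ++ [true]) (by simpa using hf)]
      simp [List.replicate_succ]

-- with enough fuel, the final (j, flags) of the two-pointer loop depend neither on
-- the fuel nor on the segment accumulator
theorem pvLoopFuel (g1 g2 : List String) :
    ∀ (f f' i j : Nat) (flags : List Bool) (segs segs' : List (Nat × Nat)),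
      g2.length ≤ j + f → g2.length ≤ j + f' →
      ((fta_loop g1 g2 f i j flags segs).2.1, (fta_loop g1 g2 f i j flags segs).2.2.1)
        = ((fta_loop g1 g2 f' i j flags segs').2.1, (fta_loop g1 g2 f' i j flags segs').2.2.1) := by
  intro f
  induction f with
  | zero =>
    intro f' i j flags segs segs' h h'
    rw [fta_loop]
    cases f' with
    | zero => rw [fta_loop]
    | succ f' => rw [fta_loop, if_neg (by omega)]
  | succ f ih =>
    intro f' i j flags segs segs' h h'
    cases f' with
    | zero =>
      rw [fta_loop]
      rw [fta_loop, if_neg (by omega)]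
    | succ f' =>
      rw [fta_loop, fta_loop]
      by_cases hg : i < g1.length ∧ j < g2.length
      · rw [if_pos hg, if_pos hg]
        by_cases hfl : flags.getD j false = true
        · rw [if_pos hfl, if_pos hfl]
          exact ih f' i (j + 1) flags segs segs' (by omega) (by omega)
        · rw [if_neg hfl, if_neg hfl]
          by_cases hm : g1.getD i "" = g2.getD j ""
          · rw [if_pos hm, if_pos hm]
            have hlt : j < (fta_extend g1 g2 flags g2.length i j).2 :=
              pvExtend_lt g1 g2 flags g2.length i j ⟨hg.1, hg.2, by simpa using hfl, hm⟩ (by omega)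
            exact ih f' _ _ flags _ _ (by omega) (by omega)
          · rw [if_neg hm, if_neg hm]
            exact ih f' i (j + 1) (flags.set j true) segs segs' (by omega) (by omega)
      · rw [if_neg hg, if_neg hg]

-- running the loop from the inner extend-loop's endpoint is the same as from its start
theorem pvLoopFromExtend (g1 g2 : List String) (flags : List Bool) (i j f f' : Nat)
    (segs segs' : List (Nat × Nat)) (hf : g2.length ≤ j + f) (hf' : g2.length ≤ j + f') :
    ((fta_loop g1 g2 f (fta_extend g1 g2 flags g2.length i j).1
        (fta_extend g1 g2 flags g2.length i j).2 flags segs).2.1,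
     (fta_loop g1 g2 f (fta_extend g1 g2 flags g2.length i j).1
        (fta_extend g1 g2 flags g2.length i j).2 flags segs).2.2.1)
      = ((fta_loop g1 g2 f' i j flags segs').2.1, (fta_loop g1 g2 f' i j flags segs').2.2.1) := by
  by_cases hc : i < g1.length ∧ j < g2.length ∧ flags.getD j false = false ∧ g1.getD i "" = g2.getD j ""
  · have hlt : j < (fta_extend g1 g2 flags g2.length i j).2 :=
      pvExtend_lt g1 g2 flags g2.length i j hc (by omega)
    cases f' with
    | zero => exact absurd hc.2.1 (by omega)
    | succ f' =>
      conv_rhs => rw [fta_loop]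
      rw [if_pos ⟨hc.1, hc.2.1⟩, if_neg (by rw [hc.2.2.1]; simp), if_pos hc.2.2.2]
      exact pvLoopFuel g1 g2 f f' _ _ flags _ _ (by omega) (by omega)
  · rw [pvExtend_stop g1 g2 flags g2.length i j hc]
    exact pvLoopFuel g1 g2 f f' i j flags segs segs' hf hf'

-- ----- the two-pointer loop followed by the tail loop turns pvFlags1 into pvCFlags -----
theorem pvLoopMain (g1 g2 : List String) :
    ∀ (suf pre : List String) (preF : List Bool) (i f : Nat) (segs : List (Nat × Nat)),
      g2 = pre ++ suf → preF.length = pre.length → g2.length ≤ pre.length + f →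
      fta_tail (fta_loop g1 g2 f i pre.length (preF ++ pvFlags1 g1 pre suf) segs).2.2.1.length
               (fta_loop g1 g2 f i pre.length (preF ++ pvFlags1 g1 pre suf) segs).2.2.1
               (fta_loop g1 g2 f i pre.length (preF ++ pvFlags1 g1 pre suf) segs).2.1
        = preF ++ pvCFlags g1 i pre suf := by
  intro suf
  induction suf with
  | nil =>
    intro pre preF i f segs hg2 hlen hf
    have hstop : fta_loop g1 g2 f i pre.length (preF ++ pvFlags1 g1 pre []) segs
        = (i, pre.length, preF ++ pvFlags1 g1 pre [], segs) := by
      cases f with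
      | zero => rw [fta_loop]
      | succ f => rw [fta_loop, if_neg (by subst hg2; simp)]
    rw [hstop]
    simp only [pvFlags1, pvCFlags, List.append_nil]
    rw [← hlen]
    cases preF with
    | nil => rfl
    | cons b t =>
      rw [List.length_cons, fta_tail, if_neg (by simp)]
  | cons g rest ih =>
    intro pre preF i f segs hg2 hlen hf
    have hj : pre.length < g2.length := by subst hg2; simp
    have hgetg : g2.getD pre.length "" = g := by subst hg2; simp [← hlen]
    have hlg : (pre ++ [g]).length = pre.length + 1 := by simp
    cases f with
    | zero => omega
    | succ f =>
      by_cases hi : i < g1.length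
      · rw [fta_loop, if_pos ⟨hi, hj⟩]
        simp only [pvFlags1]
        have hflag : ((preF ++ decide (g1.count g ≤ pre.count g) :: pvFlags1 g1 (pre ++ [g]) rest).getD
            pre.length false) = decide (g1.count g ≤ pre.count g) := by
          rw [← hlen]; simp
        by_cases he : g1.count g ≤ pre.count g
        · rw [if_pos (by rw [hflag]; simp [he])]
          have hsplit : preF ++ decide (g1.count g ≤ pre.count g) :: pvFlags1 g1 (pre ++ [g]) rest
              = (preF ++ [true]) ++ pvFlags1 g1 (pre ++ [g]) rest := by simp [he]
          have hlen1 : pre.length + 1 = (pre ++ [g]).length := by simp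
          rw [hsplit, hlen1,
            ih (pre ++ [g]) (preF ++ [true]) i f segs (by simp [hg2]) (by simp [hlen]) (by rw [hlg]; omega)]
          simp only [pvCFlags, if_pos he]
          simp
        · rw [if_neg (by rw [hflag]; simp [he])]
          by_cases hm : g1.getD i "" = g2.getD pre.length ""
          · rw [if_pos hm]
            set FL := preF ++ decide (g1.count g ≤ pre.count g) :: pvFlags1 g1 (pre ++ [g]) rest with hFL
            have hflagF : FL.getD pre.length false = false := by
              rw [hFL, ← hlen]; simp [he]
            set segs' := segs ++ [(pre.length, (fta_extend g1 g2 FL g2.length i pre.length).2)] with hsegs'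
            have hone : fta_extend g1 g2 FL g2.length i pre.length
                = fta_extend g1 g2 FL g2.length (i + 1) (pre.length + 1) := by
              have hL : g2.length = (g2.length - 1) + 1 := by omega
              rw [hL, fta_extend, if_pos ⟨hi, hj, hflagF, hm⟩]
              exact pvExtend_fuel g1 g2 FL (g2.length - 1) ((g2.length - 1) + 1) (i + 1)
                (pre.length + 1) (by omega) (by omega)
            have hP := pvLoopFromExtend g1 g2 FL (i + 1) (pre.length + 1) f f segs' segs
              (by omega) (by omega)
            have h1 := congrArg Prod.fst hP
            have h2 := congrArg Prod.snd hP
            simp only at h1 h2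
            rw [hone, h1, h2]
            have hFL2 : FL = (preF ++ [false]) ++ pvFlags1 g1 (pre ++ [g]) rest := by
              rw [hFL]; simp [he]
            have hlen1 : pre.length + 1 = (pre ++ [g]).length := by simp
            rw [hFL2, hlen1,
              ih (pre ++ [g]) (preF ++ [false]) (i + 1) f segs (by simp [hg2]) (by simp [hlen]) (by rw [hlg]; omega)]
            have hmg : i < g1.length ∧ g1.getD i "" = g := ⟨hi, by rw [hm, hgetg]⟩
            simp only [pvCFlags, if_neg he, if_pos hmg]
            simp
          · rw [if_neg hm]
            have hset : (preF ++ decide (g1.count g ≤ pre.count g) :: pvFlags1 g1 (pre ++ [g]) rest).set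
                pre.length true = (preF ++ [true]) ++ pvFlags1 g1 (pre ++ [g]) rest := by
              rw [← hlen]; simp
            have hlen1 : pre.length + 1 = (pre ++ [g]).length := by simp
            rw [hset, hlen1,
              ih (pre ++ [g]) (preF ++ [true]) i f segs (by simp [hg2]) (by simp [hlen]) (by rw [hlg]; omega)]
            have hmg : ¬ (i < g1.length ∧ g1.getD i "" = g) := by
              rw [hgetg] at hm; tauto
            simp only [pvCFlags, if_neg he, if_neg hmg]
            simp
      · rw [fta_loop, if_neg (by tauto)]
        have htail : fta_tail (preF ++ pvFlags1 g1 pre (g :: rest)).length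
            (preF ++ pvFlags1 g1 pre (g :: rest)) pre.length
            = preF ++ List.replicate (pvFlags1 g1 pre (g :: rest)).length true := by
          rw [← hlen]
          exact pvTail _ _ preF (by simp)
        rw [htail, pvCFlags_of_le g1 (g :: rest) i pre (by omega), pvFlags1_length]

-- ----- A's grouping pass over (index, flag) pairs is the zip fold -----
theorem pvGroup (g2 : List String) :
    ∀ (fl : List Bool) (pre suf : List String) (st : List (List String) × List String),
      g2 = pre ++ suf → fl.length = suf.length →
      (PySem.List.enumerate fl (pre.length : Int)).foldl
        (fun (st : List (List String) × List String) p =>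
          if p.2 then (st.1, st.2 ++ [PySem.List.pyGetD g2 p.1 ""])
          else if st.2.isEmpty then st else (st.1 ++ [st.2], [])) st
      = (fl.zip suf).foldl pvGStep st := by
  intro fl
  induction fl with
  | nil => intro pre suf st _ _; simp
  | cons b fr ih =>
    intro pre suf st hg2 hlen
    cases suf with
    | nil => simp at hlen
    | cons s sr =>
      rw [PySem.List.enumerate_cons, List.foldl_cons, List.zip_cons_cons, List.foldl_cons]
      have hget : PySem.List.pyGetD g2 (pre.length : Int) "" = s := by
        subst hg2; rw [PySem.List.pyGetD_natCast]; simp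
      have harg : ((pre.length : Int)) + 1 = (((pre ++ [s]).length : Nat) : Int) := by
        simp
      rw [hget, harg, ih (pre ++ [s]) sr _ (by simp [hg2]) (by simpa using hlen)]
      congr 1

-- ----- B's single sweep is the zip fold over pvCFlags -----
theorem pvAlt (g1 : List String) :
    ∀ (suf pre : List String) (i : Nat) (seen : PySem.Dict String Int)
      (chunks : List (List String)) (cur : List String),
      (∀ x, seen.getD x 0 = (pre.count x : Int)) →
      (suf.foldl
        (fun (st : PySem.Dict String Int × Nat × List (List String) × List String) gene =>
          let seen := st.1.insert gene (st.1.getD gene 0 + 1)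
          if seen.getD gene 0 > (PySem.Dict.counter g1).getD gene 0 then
            (seen, st.2.1, st.2.2.1, st.2.2.2 ++ [gene])
          else if st.2.1 < g1.length ∧ g1.getD st.2.1 "" = gene then
            (seen, st.2.1 + 1, (if st.2.2.2.isEmpty then st.2.2.1 else st.2.2.1 ++ [st.2.2.2]), [])
          else (seen, st.2.1, st.2.2.1, st.2.2.2 ++ [gene]))
        (seen, i, chunks, cur)).2.2
      = ((pvCFlags g1 i pre suf).zip suf).foldl pvGStep (chunks, cur) := by
  intro suf
  induction suf with
  | nil => intro pre i seen chunks cur _; rfl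
  | cons g rest ih =>
    intro pre i seen chunks cur hseen
    rw [List.foldl_cons]
    have hcnt : (seen.insert g (seen.getD g 0 + 1)).getD g 0 = ((pre.count g : Nat) : Int) + 1 := by
      rw [PySem.Dict.getD_insert_self, hseen]
    have hctr : (PySem.Dict.counter g1).getD g 0 = ((g1.count g : Nat) : Int) :=
      PySem.Dict.getD_counter g1 g
    have hnext := pvSeen_step pre g seen hseen
    simp only
    by_cases he : g1.count g ≤ pre.count g
    · rw [if_pos (by rw [hcnt, hctr]; omega)]
      rw [ih (pre ++ [g]) i _ chunks (cur ++ [g]) hnext]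
      simp [pvCFlags, pvGStep, he]
    · rw [if_neg (by rw [hcnt, hctr]; omega)]
      by_cases hm : i < g1.length ∧ g1.getD i "" = g
      · rw [if_pos hm]
        rw [ih (pre ++ [g]) (i + 1) _ _ [] hnext]
        simp only [pvCFlags, if_neg he, if_pos hm, List.zip_cons_cons, List.foldl_cons]
        by_cases hcur : cur = [] <;> simp [pvGStep, hcur]
      · rw [if_neg hm]
        rw [ih (pre ++ [g]) i _ chunks (cur ++ [g]) hnext]
        simp only [pvCFlags, if_neg he, if_neg hm, List.zip_cons_cons, List.foldl_cons]
        simp [pvGStep]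

-- ===== VERDICT (by name: the statement is the Claim_ definition above) =====
theorem find_translocated_chunks_spec : Claim_equal_find_translocated_chunks := by
  intro g1 g2 _
  unfold Spec_find_translocated_chunks find_translocated_chunks find_translocated_chunks_alt
  have hempty : ∀ x : String, (PySem.Dict.empty : PySem.Dict String Int).getD x 0
      = ((([] : List String).count x : Nat) : Int) := by
    intro x; simp [PySem.Dict.getD_empty]
  have h1 := pvStep1 g1 g2 [] [] PySem.Dict.empty hempty rfl
  simp only [List.length_nil, Nat.cast_zero, List.nil_append] at h1
  have h2 := pvLoopMain g1 g2 g2 [] [] 0 (g2.length + 1) [] (by simp) rfl (by omega)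
  simp only [List.length_nil, List.nil_append] at h2
  have h3 := pvAlt g1 g2 [] 0 PySem.Dict.empty [] [] hempty
  have h4 := pvGroup g2 (pvCFlags g1 0 [] g2) [] g2 ([], []) (by simp) (pvCFlags_length g1 g2 0 [])
  simp only [List.length_nil, Nat.cast_zero] at h4
  simp only [h1, h3]
  rw [h2, h4]
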